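-- pv_equiv track=rewrite | github.com/Huseyci/Allen-AI-Report-Parser | extract_citations.py | wrap_text_justified
-- ===== SOURCE A (Python) =====
-- def justify_text(text, width):
--     """Justify text to fit exactly within specified width."""
--     words = text.split()
--     if len(words) <= 1 or len(text) >= width:
--         return text.ljust(width)
--
--     total_chars = sum(len(word) for word in words)
--     total_gaps = len(words) - 1
--     total_spaces_needed = width - total_chars
--
--     if total_gaps == 0:
--         return text.ljust(width)
--
--     spaces_per_gap = total_spaces_needed // total_gaps
--     extra_spaces = total_spaces_needed % total_gaps
--
--     result = []
--     for i, word in enumerate(words[:-1]):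
--         result.append(word)
--         result.append(' ' * (spaces_per_gap + (1 if i < extra_spaces else 0)))
--     result.append(words[-1])
--
--     return ''.join(result)
--
-- def wrap_text_justified(text, width, justify=False):
--     """Wrap text to fit within specified width, optionally with justification."""
--     words = text.split()
--     lines = []
--     current_line = []
--     current_length = 0
--
--     for word in words:
--         word_len = len(word)
--         if current_length + word_len + len(current_line) <= width:
--             current_line.append(word)
--             current_length += word_len
--         else:
--             if current_line:
--                 line_text = ' '.join(current_line)
--                 lines.append(justify_text(line_text, width) if justify else line_text)
--             current_line = [word]
--             current_length = word_len
--
--     if current_line: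
--         lines.append(' '.join(current_line))
--
--     return lines if lines else ['']
-- ===== SOURCE B (Python) =====
-- def justify_text(text, width):
--     """Justify text to fit exactly within specified width."""
--     words = text.split()
--     if len(words) <= 1 or len(text) >= width:
--         return text.ljust(width)
--
--     total_chars = sum(len(word) for word in words)
--     total_gaps = len(words) - 1
--     total_spaces_needed = width - total_chars
--
--     if total_gaps == 0:
--         return text.ljust(width)
--
--     spaces_per_gap = total_spaces_needed // total_gaps
--     extra_spaces = total_spaces_needed % total_gaps
--
--     result = []
--     for i, word in enumerate(words[:-1]):
--         result.append(word)
--         result.append(' ' * (spaces_per_gap + (1 if i < extra_spaces else 0)))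
--     result.append(words[-1])
--
--     return ''.join(result)
--
--
-- def _take_line(words, width):
--     """Split a non-empty word list into the maximal greedy first line and the rest."""
--     line = [words[0]]
--     total = len(words[0])
--     rest = words[1:]
--     while rest and total + len(rest[0]) + len(line) <= width:
--         line.append(rest[0])
--         total += len(rest[0])
--         rest = rest[1:]
--     return line, rest
--
--
-- def _groups(words, width):
--     """Recursively peel off greedy lines: list of word-groups, one per output line."""
--     if not words:
--         return []
--     line, rest = _take_line(words, width)
--     return [line] + _groups(rest, width)
--
--
-- def wrap_text_justified(text, width, justify=False):
--     """Wrap text to fit within specified width, optionally with justification."""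
--     words = text.split()
--     if not words:
--         return ['']
--     groups = _groups(words, width)
--     body = [justify_text(' '.join(g), width) if justify else ' '.join(g)
--             for g in groups[:-1]]
--     return body + [' '.join(groups[-1])]
-- ===== Notes on version B (the rewrite author's own statement) =====
-- stated objective: alternative
-- what changed: Replaces A's single stateful accumulator loop (flush-on-overflow with trailing-state cleanup and an empty-lines fallback) by a two-phase design: a recursive grouping pass that peels off the maximal greedy line prefix at each step, then a separate formatting pass that justifies every group but the last.
import Mathlib
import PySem

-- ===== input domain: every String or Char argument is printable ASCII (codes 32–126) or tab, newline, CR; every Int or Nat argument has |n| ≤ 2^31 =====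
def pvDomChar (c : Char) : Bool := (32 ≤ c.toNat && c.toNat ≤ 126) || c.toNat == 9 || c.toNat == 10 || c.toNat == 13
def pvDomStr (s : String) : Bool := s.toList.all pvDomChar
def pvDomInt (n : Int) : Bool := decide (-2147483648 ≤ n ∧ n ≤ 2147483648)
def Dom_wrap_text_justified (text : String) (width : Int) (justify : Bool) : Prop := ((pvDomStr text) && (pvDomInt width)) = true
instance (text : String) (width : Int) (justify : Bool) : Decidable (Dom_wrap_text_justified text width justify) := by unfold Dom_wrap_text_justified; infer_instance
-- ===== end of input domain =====

-- B replaces A's stateful flush-on-overflow accumulator loop by a recursive greedy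
-- grouping pass followed by a separate formatting pass (same cost, different decomposition).

-- ===== PORT A =====
-- shared helper: Python's str.ljust(width) (no pad when width ≤ len)
def pyLjust (s : String) (w : Int) : String :=
  String.ofList (s.toList ++ List.replicate (w - PySem.Str.len s).toNat ' ')

-- shared helper justify_text (identical in Source A and Source B; Source B reuses it unchanged)
def justify_text (text : String) (width : Int) : String :=
  let words := PySem.Str.split₀ text
  if (words.length : Int) ≤ 1 ∨ PySem.Str.len text ≥ width then pyLjust text width
  else
    let total_chars := (words.map (fun w => PySem.Str.len w)).sum
    let total_gaps : Int := (words.length : Int) - 1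
    let total_spaces_needed := width - total_chars
    if total_gaps = 0 then pyLjust text width
    else
      let spaces_per_gap := PySem.Int.floordiv total_spaces_needed total_gaps
      let extra_spaces := PySem.Int.mod total_spaces_needed total_gaps
      let result := (PySem.List.enumerate (PySem.List.slice words none (some (-1))) 0).foldl
        (fun acc (p : Int × String) =>
          acc ++ [p.2, String.ofList (List.replicate (spaces_per_gap + (if p.1 < extra_spaces then 1 else 0)).toNat ' ')]) []
      -- words[-1]: words is nonempty on this branch, so pyGet? returns some; getD "" is never used
      let result := result ++ [(PySem.List.pyGet? words (-1)).getD ""]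
      PySem.Str.join "" result

def joinSp (ws : List String) : String := PySem.Str.join " " ws

-- the expression `justify_text(' '.join(g), width) if justify else ' '.join(g)` (in both Source A and Source B)
def fmtLine (justify : Bool) (width : Int) (g : List String) : String :=
  if justify then justify_text (joinSp g) width else joinSp g

-- A's for-loop over words, state (lines, current_line, current_length)
def aLoop (width : Int) (justify : Bool) :
    List String → List String → List String → Int → List String × List String × Int
  | [], lines, cur, clen => (lines, cur, clen)
  | w :: ws, lines, cur, clen =>
    if clen + PySem.Str.len w + (cur.length : Int) ≤ width then
      aLoop width justify ws lines (cur ++ [w]) (clen + PySem.Str.len w)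
    else
      aLoop width justify ws
        (if cur ≠ [] then lines ++ [fmtLine justify width cur] else lines)
        [w] (PySem.Str.len w)

def wrap_text_justified (text : String) (width : Int) (justify : Bool) : List String :=
  let st := aLoop width justify (PySem.Str.split₀ text) [] [] 0
  let lines := if st.2.1 ≠ [] then st.1 ++ [joinSp st.2.1] else st.1
  if lines ≠ [] then lines else [""]

-- ===== PORT B =====
-- Source B _take_line's while loop: state (rest, line, total)
def takeLineLoop (width : Int) : List String → List String → Int → List String × List String
  | [], line, _ => (line, [])
  | w :: rest, line, total =>
    if total + PySem.Str.len w + (line.length : Int) ≤ width then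
      takeLineLoop width rest (line ++ [w]) (total + PySem.Str.len w)
    else (line, w :: rest)

-- termination fact for groupsB (the rest returned by _take_line is a suffix of its input)
theorem takeLineLoop_rest_le (width : Int) :
    ∀ (ws line : List String) (total : Int),
      ((takeLineLoop width ws line total).2).length ≤ ws.length := by
  intro ws
  induction ws with
  | nil => intro line total; simp [takeLineLoop]
  | cons w rest ih =>
    intro line total
    simp only [takeLineLoop]
    split
    · exact le_trans (ih _ _) (Nat.le_succ _)
    · simp

-- Source B _groups: peel off the maximal greedy first line, recurse on the rest
def groupsB (width : Int) : List String → List (List String)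
  | [] => []
  | w :: ws =>
    let p := takeLineLoop width ws [w] (PySem.Str.len w)
    p.1 :: groupsB width p.2
termination_by ws => ws.length
decreasing_by
  have := takeLineLoop_rest_le width ws [w] (PySem.Str.len w)
  simpa using Nat.lt_succ_of_le this

def wrap_text_justified_alt (text : String) (width : Int) (justify : Bool) : List String :=
  match PySem.Str.split₀ text with
  | [] => [""]
  | w :: ws =>
    let groups := groupsB width (w :: ws)
    -- groups[:-1] = dropLast, groups[-1] = getLastD (groups is nonempty); exact
    (groups.dropLast.map (fmtLine justify width)) ++ [joinSp (groups.getLastD [])]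

-- ===== PRECONDITION & SPEC =====
def Spec_wrap_text_justified (text : String) (width : Int) (justify : Bool) (out : List String) : Prop := out = wrap_text_justified_alt text width justify
instance (text : String) (width : Int) (justify : Bool) (out : List String) : Decidable (Spec_wrap_text_justified text width justify out) := by unfold Spec_wrap_text_justified; infer_instance

-- ===== CLAIM (what is proved, stated in full; the proofs are below) =====
def Claim_equal_wrap_text_justified : Prop := ∀ (text : String) (width : Int) (justify : Bool), Dom_wrap_text_justified text width justify → Spec_wrap_text_justified text width justify (wrap_text_justified text width justify)

-- ===== LEMMAS AND PROOFS =====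

-- B's formatting pass, as a function of the group list
def fmtGroups (justify : Bool) (width : Int) (gs : List (List String)) : List String :=
  (gs.dropLast.map (fmtLine justify width)) ++ [joinSp (gs.getLastD [])]

theorem fmtGroups_ne_nil (justify : Bool) (width : Int) (gs : List (List String)) :
    fmtGroups justify width gs ≠ [] := by
  simp [fmtGroups]

theorem fmtGroups_cons (justify : Bool) (width : Int) (g : List String)
    (gs : List (List String)) (h : gs ≠ []) :
    fmtGroups justify width (g :: gs) = fmtLine justify width g :: fmtGroups justify width gs := by
  obtain ⟨g', gs', rfl⟩ := List.exists_cons_of_ne_nil h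
  simp [fmtGroups]

theorem finalizeA_eq (width : Int) (justify : Bool) :
    ∀ (ws cur : List String) (clen : Int) (lines : List String), cur ≠ [] →
      (if (aLoop width justify ws lines cur clen).2.1 ≠ []
       then (aLoop width justify ws lines cur clen).1 ++ [joinSp (aLoop width justify ws lines cur clen).2.1]
       else (aLoop width justify ws lines cur clen).1)
      = lines ++ fmtGroups justify width
          ((takeLineLoop width ws cur clen).1 :: groupsB width (takeLineLoop width ws cur clen).2) := by
  intro ws
  induction ws with
  | nil =>
    intro cur clen lines hcur
    simp [aLoop, takeLineLoop, groupsB, fmtGroups, hcur]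
  | cons w ws ih =>
    intro cur clen lines hcur
    simp only [aLoop, takeLineLoop]
    split
    · exact ih (cur ++ [w]) (clen + PySem.Str.len w) lines (by simp)
    · rw [ih [w] (PySem.Str.len w) (lines ++ [fmtLine justify width cur]) (by simp)]
      rw [List.append_assoc]
      congr 1
      show [fmtLine justify width cur] ++
          fmtGroups justify width ((takeLineLoop width ws [w] (PySem.Str.len w)).1 ::
            groupsB width (takeLineLoop width ws [w] (PySem.Str.len w)).2)
          = fmtGroups justify width (cur :: groupsB width (w :: ws))
      rw [groupsB]
      exact (fmtGroups_cons justify width cur _ (List.cons_ne_nil _ _)).symm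

-- ===== VERDICT (by name: the statement is the Claim_ definition above) =====
theorem wrap_text_justified_spec : Claim_equal_wrap_text_justified := by
  intro text width justify _
  unfold Spec_wrap_text_justified
  cases h : PySem.Str.split₀ text with
  | nil =>
    unfold wrap_text_justified wrap_text_justified_alt
    simp [h, aLoop]
  | cons w ws =>
    have halt : wrap_text_justified_alt text width justify
        = fmtGroups justify width (groupsB width (w :: ws)) := by
      unfold wrap_text_justified_alt; rw [h]; rfl
    have hstep : aLoop width justify (w :: ws) [] [] 0
        = aLoop width justify ws [] [w] (PySem.Str.len w) := by
      simp [aLoop]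
    have key := finalizeA_eq width justify ws [w] (PySem.Str.len w) [] (by simp)
    simp only [List.nil_append] at key
    unfold wrap_text_justified
    simp only [h, hstep]
    rw [key, halt, groupsB]
    simp [fmtGroups_ne_nil]
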